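-- pv_equiv track=rewrite | github.com/zhongfendeng/JPAVE | train_modules/evaluation_metrics.py | parse_values_for_attribute
-- ===== SOURCE A (Python) =====
-- def parse_values_for_attribute(each_attribute_values_list, token2id_map, id2token_map):
--     #attr_name = id2attribute_map[attribute_index]
--     attr_values = []
--     one_value = []
--     for each_word_idx in each_attribute_values_list:
--         if int(each_word_idx) == token2id_map['[EOS]']:
--             break
--         if int(each_word_idx) == token2id_map['[SEP]']:  ## split token for values
--             attr_values.append(one_value)
--             one_value = []
--         else:
--             one_value.append(id2token_map[int(each_word_idx)])
--     # add the last generated value (either exit above loop by EOS or just finish the loop)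
--     if len(one_value) != 0:
--         attr_values.append(one_value)
--     return attr_values
-- ===== SOURCE B (Python) =====
-- def _split_on(ids, sep):
--     if sep in ids:
--         i = ids.index(sep)
--         return [ids[:i]] + _split_on(ids[i + 1:], sep)
--     return [ids]
--
--
-- def parse_values_for_attribute(each_attribute_values_list, token2id_map, id2token_map):
--     if not each_attribute_values_list:
--         return []
--     eos = token2id_map['[EOS]']
--     sep = token2id_map['[SEP]']
--     ids = [int(x) for x in each_attribute_values_list]
--     if eos in ids:
--         ids = ids[:ids.index(eos)]
--     segments = _split_on(ids, sep)
--     if segments[-1] == []: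
--         segments = segments[:-1]
--     return [[id2token_map[y] for y in seg] for seg in segments]
-- ===== Notes on version B (the rewrite author's own statement) =====
-- stated objective: alternative
-- what changed: Replaces A's single stateful loop (break on EOS, accumulator group flushed on SEP) by a two-phase decomposition: truncate the id list at the first [EOS], recursively split it into segments at each [SEP], drop a trailing empty segment, then map every segment through the id-to-token table.
-- outside the precondition, e.g. on parse_values_for_attribute([5], {'[EOS]': 5}, {}): A returns [], B raises KeyError
import Mathlib
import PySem

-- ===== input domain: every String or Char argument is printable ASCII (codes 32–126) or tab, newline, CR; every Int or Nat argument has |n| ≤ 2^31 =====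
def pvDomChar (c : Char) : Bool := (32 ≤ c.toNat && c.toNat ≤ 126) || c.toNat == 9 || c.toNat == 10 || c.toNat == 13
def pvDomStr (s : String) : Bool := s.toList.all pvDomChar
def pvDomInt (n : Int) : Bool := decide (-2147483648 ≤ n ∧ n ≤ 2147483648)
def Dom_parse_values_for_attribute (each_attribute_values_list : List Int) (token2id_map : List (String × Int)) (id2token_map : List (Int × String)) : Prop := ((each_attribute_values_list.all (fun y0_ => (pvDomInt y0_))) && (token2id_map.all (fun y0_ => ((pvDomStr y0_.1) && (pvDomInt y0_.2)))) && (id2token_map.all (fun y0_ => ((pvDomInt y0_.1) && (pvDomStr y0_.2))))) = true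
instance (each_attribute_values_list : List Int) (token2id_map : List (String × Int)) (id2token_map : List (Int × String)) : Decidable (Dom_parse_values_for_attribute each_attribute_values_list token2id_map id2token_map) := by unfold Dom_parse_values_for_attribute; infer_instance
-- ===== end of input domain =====

-- B replaces A's stateful break/flush loop by truncate-at-EOS, recursive split-at-SEP,
-- drop-trailing-empty, then map through the id table: an alternative decomposition, same cost.


-- first-match association-list lookup = Python dict lookup under the type convention
def pvTokId (m : List (String × Int)) (k : String) : Option Int :=
  (PySem.Dict.mk m).get? k
def pvIdTok (m : List (Int × String)) (k : Int) : Option String :=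
  (PySem.Dict.mk m).get? k

-- ===== PORT A =====
-- A's loop: break at [EOS]; at [SEP] flush the current group; else append the looked-up token.
-- (lookups use .getD; Pre_ guarantees they succeed, so the default is never consulted inside Pre_)
def pvA_loop (t_eos t_sep : Int) (i2t : List (Int × String)) :
    List Int → List (List String) → List String → List (List String) × List String
  | [], acc, one => (acc, one)
  | x :: xs, acc, one =>
    if x = t_eos then (acc, one)
    else if x = t_sep then pvA_loop t_eos t_sep i2t xs (acc ++ [one]) []
    else pvA_loop t_eos t_sep i2t xs acc (one ++ [(pvIdTok i2t x).getD ""])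

def parse_values_for_attribute (each_attribute_values_list : List Int) (token2id_map : List (String × Int)) (id2token_map : List (Int × String)) : List (List String) :=
  let t_eos := (pvTokId token2id_map "[EOS]").getD 0
  let t_sep := (pvTokId token2id_map "[SEP]").getD 0
  let p := pvA_loop t_eos t_sep id2token_map each_attribute_values_list [] []
  if p.2.length ≠ 0 then p.1 ++ [p.2] else p.1

-- ===== PORT B =====
-- B's recursive splitter: ids[:i] before the first sep, recurse on ids[i+1:]
def pvSplitOn (sep : Int) (ids : List Int) : List (List Int) :=
  match h : PySem.List.index? ids sep with
  | some i => ids.take i :: pvSplitOn sep (ids.drop (i + 1))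
  | none => [ids]
termination_by ids.length
decreasing_by
  obtain ⟨hk, -, -⟩ := PySem.List.getElem_of_index?_eq_some h
  simp; omega

def parse_values_for_attribute_alt (each_attribute_values_list : List Int) (token2id_map : List (String × Int)) (id2token_map : List (Int × String)) : List (List String) :=
  if each_attribute_values_list.isEmpty then []
  else match pvTokId token2id_map "[EOS]", pvTokId token2id_map "[SEP]" with
  | some eos, some sep =>
    let ids := each_attribute_values_list
    let ids := match PySem.List.index? ids eos with
               | some i => ids.take i
               | none => ids
    let segs := pvSplitOn sep ids
    let segs := if segs.getLast! = ([] : List Int) then segs.dropLast else segs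
    segs.map (fun seg => seg.map (fun y => (pvIdTok id2token_map y).getD ""))
  | _, _ => []  -- Python B raises KeyError here; excluded by Pre_

-- ===== PRECONDITION & SPEC =====
-- Pre_ excludes inputs on which A raises KeyError ('[EOS]'/'[SEP]' missing from token2id_map, or
-- an id before the first [EOS] and distinct from [SEP] missing from id2token_map); it also excludes
-- the degenerate inputs whose first token is the [EOS] id while '[SEP]' is missing, on which A
-- happens to return [] only because it breaks before the missing key is looked up — there B itself
-- raises KeyError.
def Pre_parse_values_for_attribute (each_attribute_values_list : List Int) (token2id_map : List (String × Int)) (id2token_map : List (Int × String)) : Prop :=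
  each_attribute_values_list = [] ∨
  ((pvTokId token2id_map "[EOS]").isSome ∧ (pvTokId token2id_map "[SEP]").isSome ∧
  ∀ x ∈ each_attribute_values_list.takeWhile (fun x => !(x == (pvTokId token2id_map "[EOS]").getD 0)),
    x ≠ (pvTokId token2id_map "[SEP]").getD 0 → (pvIdTok id2token_map x).isSome)
instance (each_attribute_values_list : List Int) (token2id_map : List (String × Int)) (id2token_map : List (Int × String)) : Decidable (Pre_parse_values_for_attribute each_attribute_values_list token2id_map id2token_map) := by unfold Pre_parse_values_for_attribute; infer_instance

def pvWitness_parse_values_for_attribute : List Int × (List (String × Int)) × (List (Int × String)) :=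
  ([7, 1, 8], [("[EOS]", 0), ("[SEP]", 1)], [(7, "red"), (8, "blue")])

def Spec_parse_values_for_attribute (each_attribute_values_list : List Int) (token2id_map : List (String × Int)) (id2token_map : List (Int × String)) (out : List (List String)) : Prop := out = parse_values_for_attribute_alt each_attribute_values_list token2id_map id2token_map
instance (each_attribute_values_list : List Int) (token2id_map : List (String × Int)) (id2token_map : List (Int × String)) (out : List (List String)) : Decidable (Spec_parse_values_for_attribute each_attribute_values_list token2id_map id2token_map out) := by unfold Spec_parse_values_for_attribute; infer_instance

-- ===== CLAIM (what is proved, stated in full; the proofs are below) =====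
def Claim_equal_parse_values_for_attribute : Prop := ∀ (each_attribute_values_list : List Int) (token2id_map : List (String × Int)) (id2token_map : List (Int × String)), Dom_parse_values_for_attribute each_attribute_values_list token2id_map id2token_map → Pre_parse_values_for_attribute each_attribute_values_list token2id_map id2token_map → Spec_parse_values_for_attribute each_attribute_values_list token2id_map id2token_map (parse_values_for_attribute each_attribute_values_list token2id_map id2token_map)

-- ===== LEMMAS AND PROOFS =====

-- proof-only helpers
def pvMapTok (i2t : List (Int × String)) (seg : List Int) : List String :=
  seg.map (fun y => (pvIdTok i2t y).getD "")

-- string-level view of B's split-trim-map pipeline, with the pending group `one` prepended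
def pvBstr (sep : Int) (i2t : List (Int × String)) (one : List String) (ids : List Int) : List (List String) :=
  match h : PySem.List.index? ids sep with
  | some i => (one ++ pvMapTok i2t (ids.take i)) :: pvBstr sep i2t [] (ids.drop (i + 1))
  | none => if (one ++ pvMapTok i2t ids).length ≠ 0 then [one ++ pvMapTok i2t ids] else []
termination_by ids.length
decreasing_by
  obtain ⟨hk, -, -⟩ := PySem.List.getElem_of_index?_eq_some h
  simp; omega

-- unfolding equations (the definitions use a dependent match, so we expose them once)
theorem pvSplitOn_of_some (sep : Int) (ids : List Int) (i : Nat)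
    (h : PySem.List.index? ids sep = some i) :
    pvSplitOn sep ids = ids.take i :: pvSplitOn sep (ids.drop (i + 1)) := by
  rw [pvSplitOn.eq_def]; split
  · rename_i j hj; rw [h] at hj; injection hj with hij; rw [hij]
  · rename_i hn; rw [h] at hn; cases hn

theorem pvSplitOn_of_none (sep : Int) (ids : List Int)
    (h : PySem.List.index? ids sep = none) :
    pvSplitOn sep ids = [ids] := by
  rw [pvSplitOn.eq_def]; split
  · rename_i j hj; rw [h] at hj; cases hj
  · rfl

theorem pvBstr_of_some (sep : Int) (i2t : List (Int × String)) (one : List String)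
    (ids : List Int) (i : Nat) (h : PySem.List.index? ids sep = some i) :
    pvBstr sep i2t one ids
      = (one ++ pvMapTok i2t (ids.take i)) :: pvBstr sep i2t [] (ids.drop (i + 1)) := by
  rw [pvBstr.eq_def]; split
  · rename_i j hj; rw [h] at hj; injection hj with hij; rw [hij]
  · rename_i hn; rw [h] at hn; cases hn

theorem pvBstr_of_none (sep : Int) (i2t : List (Int × String)) (one : List String)
    (ids : List Int) (h : PySem.List.index? ids sep = none) :
    pvBstr sep i2t one ids
      = if (one ++ pvMapTok i2t ids).length ≠ 0 then [one ++ pvMapTok i2t ids] else [] := by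
  rw [pvBstr.eq_def]; split
  · rename_i j hj; rw [h] at hj; cases hj
  · rfl

theorem pvSplitOn_ne_nil (sep : Int) (ids : List Int) : pvSplitOn sep ids ≠ [] := by
  cases h : PySem.List.index? ids sep with
  | some i => rw [pvSplitOn_of_some sep ids i h]; simp
  | none => rw [pvSplitOn_of_none sep ids h]; simp

-- B's truncation at the first [EOS] is takeWhile (≠ eos)
theorem pvTrunc_eq_takeWhile (eos : Int) (ids : List Int) :
    (match PySem.List.index? ids eos with
     | some i => ids.take i
     | none => ids) = ids.takeWhile (fun x => !(x == eos)) := by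
  induction ids with
  | nil => simp
  | cons x xs ih =>
    by_cases hx : x = eos
    · subst hx
      rw [PySem.List.index?_cons_self]
      simp
    · rw [PySem.List.index?_cons_of_ne xs hx]
      cases h : PySem.List.index? xs eos with
      | some j =>
        rw [h] at ih
        simp only [Option.map_some]
        simp [hx, ← ih]
      | none =>
        rw [h] at ih
        simp only [Option.map_none]
        simp [hx, ← ih]

-- A's break at [EOS] = running the loop on the takeWhile prefix
theorem pvA_loop_takeWhile (eos sep : Int) (i2t : List (Int × String)) (ids : List Int) :
    ∀ acc one, pvA_loop eos sep i2t ids acc one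
      = pvA_loop eos sep i2t (ids.takeWhile (fun x => !(x == eos))) acc one := by
  induction ids with
  | nil => simp
  | cons x xs ih =>
    intro acc one
    by_cases hx : x = eos
    · subst hx; simp [pvA_loop]
    · rw [List.takeWhile_cons, if_pos (by simp [hx])]
      by_cases hs : x = sep
      · simp only [pvA_loop, if_neg hx, if_pos hs]
        exact ih (acc ++ [one]) []
      · simp only [pvA_loop, if_neg hx, if_neg hs]
        exact ih acc (one ++ [(pvIdTok i2t x).getD ""])

-- B's Int-level pipeline equals the string-level recursion with empty pending group
theorem pvB_eq_pvBstr (sep : Int) (i2t : List (Int × String)) :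
    ∀ (n : Nat) (ids : List Int), ids.length ≤ n →
    ((if (pvSplitOn sep ids).getLast! = ([] : List Int)
        then (pvSplitOn sep ids).dropLast else pvSplitOn sep ids).map (pvMapTok i2t))
      = pvBstr sep i2t [] ids := by
  intro n
  induction n with
  | zero =>
    intro ids hlen
    have : ids = [] := List.length_eq_zero_iff.mp (Nat.le_zero.mp hlen)
    subst this
    rw [pvSplitOn_of_none sep [] (by simp), pvBstr_of_none sep i2t [] [] (by simp)]
    simp [pvMapTok]
  | succ n ih =>
    intro ids hlen
    cases h : PySem.List.index? ids sep with
    | none =>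
      rw [pvSplitOn_of_none sep ids h, pvBstr_of_none sep i2t [] ids h]
      cases ids <;> simp [pvMapTok]
    | some i =>
      obtain ⟨hk, -, -⟩ := PySem.List.getElem_of_index?_eq_some h
      have hrec : (ids.drop (i + 1)).length ≤ n := by simp; omega
      rw [pvSplitOn_of_some sep ids i h, pvBstr_of_some sep i2t [] ids i h]
      obtain ⟨r, rs, hr⟩ := List.exists_cons_of_ne_nil (pvSplitOn_ne_nil sep (ids.drop (i + 1)))
      have ihd := ih (ids.drop (i + 1)) hrec
      rw [hr] at ihd ⊢
      simp only [List.getLast!_eq_getLast?_getD, List.getLast?_cons_cons, List.dropLast_cons₂] at ihd ⊢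
      rw [← ihd]
      split <;> simp

-- pvBstr step lemmas
theorem pvBstr_cons_sep (sep : Int) (i2t : List (Int × String)) (one : List String) (xs : List Int) :
    pvBstr sep i2t one (sep :: xs) = one :: pvBstr sep i2t [] xs := by
  rw [pvBstr_of_some sep i2t one (sep :: xs) 0 (PySem.List.index?_cons_self sep xs)]
  simp [pvMapTok]

theorem pvBstr_cons_ne (sep x : Int) (i2t : List (Int × String)) (one : List String) (xs : List Int)
    (hx : x ≠ sep) :
    pvBstr sep i2t one (x :: xs)
      = pvBstr sep i2t (one ++ [(pvIdTok i2t x).getD ""]) xs := by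
  cases h : PySem.List.index? xs sep with
  | some j =>
    rw [pvBstr_of_some sep i2t one (x :: xs) (j + 1)
        (by rw [PySem.List.index?_cons_of_ne xs hx, h]; rfl),
      pvBstr_of_some sep i2t _ xs j h]
    simp [pvMapTok]
  | none =>
    rw [pvBstr_of_none sep i2t one (x :: xs)
        (by rw [PySem.List.index?_cons_of_ne xs hx, h]; rfl),
      pvBstr_of_none sep i2t _ xs h]
    simp [pvMapTok]

-- main invariant: A's loop+finish on an [EOS]-free list = acc ++ B's string-level pipeline
theorem pvA_main (eos sep : Int) (i2t : List (Int × String)) (ids : List Int)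
    (hfree : ∀ x ∈ ids, x ≠ eos) :
    ∀ acc one,
      (if (pvA_loop eos sep i2t ids acc one).2.length ≠ 0
        then (pvA_loop eos sep i2t ids acc one).1 ++ [(pvA_loop eos sep i2t ids acc one).2]
        else (pvA_loop eos sep i2t ids acc one).1)
      = acc ++ pvBstr sep i2t one ids := by
  induction ids with
  | nil =>
    intro acc one
    rw [pvBstr_of_none sep i2t one [] (by simp)]
    cases one <;> simp [pvA_loop, pvMapTok]
  | cons x xs ih =>
    intro acc one
    have hx : x ≠ eos := hfree x (by simp)
    have hfree' : ∀ y ∈ xs, y ≠ eos := fun y hy => hfree y (by simp [hy])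
    by_cases hs : x = sep
    · subst hs
      simp only [pvA_loop, if_neg hx, if_true]
      rw [ih hfree' (acc ++ [one]) [], pvBstr_cons_sep]
      simp
    · simp only [pvA_loop, if_neg hx, if_neg hs]
      rw [ih hfree' acc (one ++ [(pvIdTok i2t x).getD ""]),
        pvBstr_cons_ne sep x i2t one xs hs]

-- ===== VERDICT (by name: the statement is the Claim_ definition above) =====
theorem parse_values_for_attribute_spec : Claim_equal_parse_values_for_attribute := by
  intro l t2i i2t _hdom hpre
  by_cases hl : l = []
  · subst hl
    simp [Spec_parse_values_for_attribute, parse_values_for_attribute,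
      parse_values_for_attribute_alt, pvA_loop]
  obtain ⟨heos, hsep, -⟩ := hpre.resolve_left hl
  obtain ⟨eos, heq⟩ := Option.isSome_iff_exists.mp heos
  obtain ⟨sep, hseq⟩ := Option.isSome_iff_exists.mp hsep
  unfold Spec_parse_values_for_attribute parse_values_for_attribute parse_values_for_attribute_alt
  have hlf : l.isEmpty = false := by simpa using hl
  rw [heq, hseq]
  simp only [hlf, Bool.false_eq_true, if_false, Option.getD_some]
  rw [pvTrunc_eq_takeWhile eos l]
  have hB := pvB_eq_pvBstr sep i2t (l.takeWhile (fun x => !(x == eos))).length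
    (l.takeWhile (fun x => !(x == eos))) le_rfl
  rw [show (fun seg => List.map (fun y => (pvIdTok i2t y).getD "") seg) = pvMapTok i2t
      from rfl] at *
  rw [hB, pvA_loop_takeWhile eos sep i2t l]
  exact pvA_main eos sep i2t (l.takeWhile (fun x => !(x == eos)))
    (fun x hx => by simpa using List.mem_takeWhile_imp hx) [] []
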